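-- pv_equiv track=rewrite | github.com/howardyun/OpenClaw-Proj | crawling/skills/skills_sh/enrich_github_metadata_v2.py | parse_owner_repo
-- ===== SOURCE A (Python) =====
-- from typing import Iterable, List, Optional, Tuple
--
-- def parse_owner_repo(value: str) -> Optional[Tuple[str, str]]:
--     token = (value or "").strip().strip("/")
--     if not token:
--         return None
--     parts = [part for part in token.split("/") if part]
--     if len(parts) != 2:
--         return None
--     return parts[0], parts[1]
-- ===== SOURCE B (Python) =====
-- def parse_owner_repo(value):
--     token = (value or "").strip().strip("/")
--     owner, sep, rest = token.partition("/")
--     if not sep: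
--         return None
--     repo = rest.lstrip("/")
--     if owner and repo and "/" not in repo:
--         return owner, repo
--     return None
-- ===== Notes on version B (the rewrite author's own statement) =====
-- stated objective: idiomatic
-- what changed: Replaced split('/')-then-filter-then-length-check with a single partition('/') plus lstrip('/') scan that validates the two segments directly.
import Mathlib
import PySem

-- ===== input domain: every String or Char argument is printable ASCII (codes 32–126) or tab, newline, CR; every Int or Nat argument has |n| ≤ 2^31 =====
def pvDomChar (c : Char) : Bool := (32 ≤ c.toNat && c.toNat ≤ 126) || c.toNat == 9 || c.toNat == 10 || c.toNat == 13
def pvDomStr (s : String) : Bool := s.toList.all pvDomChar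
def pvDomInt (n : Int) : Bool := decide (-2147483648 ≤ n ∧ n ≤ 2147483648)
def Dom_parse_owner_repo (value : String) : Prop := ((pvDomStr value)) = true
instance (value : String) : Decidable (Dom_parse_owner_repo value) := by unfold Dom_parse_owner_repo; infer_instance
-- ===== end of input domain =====

-- B replaces A's split('/')/filter/length-check with a single partition('/') + lstrip('/') scan (idiomatic, same cost).


-- ===== PORT A =====
-- (value or "") is value itself on strings ("".strip() = ""), so the port starts from value.
def parse_owner_repo (value : String) : Option (String × String) :=
  let token := PySem.Str.stripChars (PySem.Str.strip value) "/"
  if token = "" then none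
  else
    -- token.split("/") with the truthiness filter, on code points (exact: the sep is one ASCII char)
    let parts := (PySem.Chars.splitOn token.toList ['/']).filter (fun part => part ≠ [])
    if parts.length ≠ 2 then none
    else some (String.ofList (parts.getD 0 []), String.ofList (parts.getD 1 []))

-- ===== PORT B =====
-- token.partition("/") ported by hand for the 1-char separator: owner = chars before the first '/',
-- sep found iff a '/' remains, rest = chars after it; rest.lstrip("/") = dropWhile (== '/'). Exact.
def parse_owner_repo_alt (value : String) : Option (String × String) :=
  let token := PySem.Str.stripChars (PySem.Str.strip value) "/"
  let owner := token.toList.takeWhile (· ≠ '/')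
  match token.toList.dropWhile (· ≠ '/') with
  | [] => none          -- "if not sep: return None"
  | _ :: rest =>
    let repo := rest.dropWhile (· == '/')
    if owner ≠ [] ∧ repo ≠ [] ∧ '/' ∉ repo then
      some (String.ofList owner, String.ofList repo)
    else none

-- ===== PRECONDITION & SPEC =====
def Spec_parse_owner_repo (value : String) (out : Option (String × String)) : Prop := out = parse_owner_repo_alt value
instance (value : String) (out : Option (String × String)) : Decidable (Spec_parse_owner_repo value out) := by unfold Spec_parse_owner_repo; infer_instance

-- ===== CLAIM (what is proved, stated in full; the proofs are below) =====
def Claim_equal_parse_owner_repo : Prop := ∀ (value : String), Dom_parse_owner_repo value → Spec_parse_owner_repo value (parse_owner_repo value)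

-- ===== LEMMAS AND PROOFS =====

-- splitOn with separator ['/'] computes this fuel-free scan.
def pvSplitChar : List Char → List Char → List (List Char)
  | [], cur => [cur.reverse]
  | c :: rest, cur => if c = '/' then cur.reverse :: pvSplitChar rest [] else pvSplitChar rest (c :: cur)

lemma pv_go_eq (fuel : Nat) : ∀ (l cur : List Char) (accs : List (List Char)),
    l.length < fuel →
    PySem.Chars.splitOn.go ['/'] fuel l cur accs = accs.reverse ++ pvSplitChar l cur := by
  induction fuel with
  | zero => intro l cur accs hl; omega
  | succ f ih =>
    intro l cur accs hl
    cases l with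
    | nil => simp [PySem.Chars.splitOn.go, pvSplitChar]
    | cons c rest =>
      rw [PySem.Chars.splitOn.go]
      by_cases hc : c = '/'
      · subst hc
        rw [if_pos (by simp [List.isPrefixOf])]
        show PySem.Chars.splitOn.go ['/'] f rest [] (cur.reverse :: accs) = _
        rw [ih rest [] _ (by simpa using Nat.lt_of_succ_lt_succ hl)]
        simp [pvSplitChar]
      · rw [if_neg (by simp [List.isPrefixOf, Ne.symm hc]),
            ih rest (c :: cur) accs (by simpa using Nat.lt_of_succ_lt_succ hl)]
        simp [pvSplitChar, hc]

lemma pv_splitOn_eq (l : List Char) : PySem.Chars.splitOn l ['/'] = pvSplitChar l [] := by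
  rw [PySem.Chars.splitOn, pv_go_eq _ l [] [] (by omega)]; rfl

-- a slash-free block is consumed into the accumulator
lemma pv_append (a : List Char) : ∀ (l cur : List Char), (∀ c ∈ a, c ≠ '/') →
    pvSplitChar (a ++ l) cur = pvSplitChar l (a.reverse ++ cur) := by
  induction a with
  | nil => intro l cur _; simp
  | cons c a' ih =>
    intro l cur h
    have hc : c ≠ '/' := h c (by simp)
    simp only [List.cons_append, pvSplitChar, if_neg hc]
    rw [ih l (c :: cur) (fun d hd => h d (by simp [hd]))]
    simp

lemma pv_noslash (a : List Char) (cur : List Char) (h : ∀ c ∈ a, c ≠ '/') :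
    pvSplitChar a cur = [cur.reverse ++ a] := by
  have := pv_append a [] cur h
  simp only [List.append_nil] at this
  rw [this]; simp [pvSplitChar]

-- leading slashes contribute no nonempty segment
lemma pv_slashes (s : List Char) : ∀ (l : List Char), (∀ c ∈ s, c = '/') →
    (pvSplitChar (s ++ l) []).filter (fun part => part ≠ []) =
    (pvSplitChar l []).filter (fun part => part ≠ []) := by
  induction s with
  | nil => intro l _; simp
  | cons c s' ih =>
    intro l h
    have hc : c = '/' := h c (by simp)
    subst hc
    simp only [List.cons_append, pvSplitChar, reduceIte, List.reverse_nil]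
    rw [List.filter_cons_of_neg (by simp)]
    exact ih l (fun d hd => h d (by simp [hd]))

-- if no nonempty segment comes out, everything was slashes
lemma pv_segs_nil : ∀ (l cur : List Char),
    (pvSplitChar l cur).filter (fun part => part ≠ []) = [] → (∀ c ∈ l, c = '/') ∧ cur = [] := by
  intro l
  induction l with
  | nil =>
    intro cur h
    simp only [pvSplitChar, List.filter] at h
    constructor
    · simp
    · by_cases hc : cur.reverse = []
      · simpa using hc
      · simp [hc] at h
  | cons c rest ih =>
    intro cur h
    by_cases hc : c = '/'
    · subst hc
      simp only [pvSplitChar, reduceIte] at h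
      rw [List.filter_cons] at h
      by_cases hcur : cur.reverse = []
      · rw [if_neg (by simp [hcur])] at h
        obtain ⟨hrest, -⟩ := ih [] h
        exact ⟨by intro d hd; rcases List.mem_cons.mp hd with h1 | h2; exact h1; exact hrest d h2,
               by simpa using hcur⟩
      · rw [if_pos (by simpa using hcur)] at h
        simp at h
    · simp only [pvSplitChar, if_neg hc] at h
      obtain ⟨-, habs⟩ := ih (c :: cur) h
      simp at habs

-- the head of a dropWhile fails the predicate
lemma pv_head_dropWhile {p : Char → Bool} {l : List Char} {a : Char}
    (h : (l.dropWhile p).head? = some a) : p a = false := by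
  induction l with
  | nil => simp at h
  | cons c rest ih =>
    rw [List.dropWhile_cons] at h
    split at h
    · exact ih h
    · simp_all

lemma pv_last_dropWhile {p : Char → Bool} {l : List Char}
    (h : l.dropWhile p ≠ []) : (l.dropWhile p).getLast? = l.getLast? := by
  conv_rhs => rw [← List.takeWhile_append_dropWhile (p := p) (l := l)]
  rw [List.getLast?_append_of_ne_nil _ h]

-- the stripped token neither starts nor ends with '/'
lemma pv_strip_head (s : List Char) {c : Char}
    (h : (PySem.Chars.stripChars s ['/']).head? = some c) : c ≠ '/' := by
  simp only [PySem.Chars.stripChars] at h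
  rw [List.head?_reverse] at h
  have hne : List.dropWhile (fun c => ['/'].contains c) (List.dropWhile (fun c => ['/'].contains c) s).reverse ≠ [] := by
    intro hnil; rw [hnil] at h; simp at h
  rw [pv_last_dropWhile hne, List.getLast?_reverse] at h
  have := pv_head_dropWhile h
  simpa using this

lemma pv_strip_last (s : List Char) {c : Char}
    (h : (PySem.Chars.stripChars s ['/']).getLast? = some c) : c ≠ '/' := by
  simp only [PySem.Chars.stripChars] at h
  rw [List.getLast?_reverse] at h
  have := pv_head_dropWhile h
  simpa using this

-- the two post-token computations, as functions of the token's characters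
def pvA (l : List Char) : Option (String × String) :=
  let parts := (PySem.Chars.splitOn l ['/']).filter (fun part => part ≠ [])
  if parts.length ≠ 2 then none
  else some (String.ofList (parts.getD 0 []), String.ofList (parts.getD 1 []))

def pvB (l : List Char) : Option (String × String) :=
  let owner := l.takeWhile (· ≠ '/')
  match l.dropWhile (· ≠ '/') with
  | [] => none
  | _ :: rest =>
    let repo := rest.dropWhile (· == '/')
    if owner ≠ [] ∧ repo ≠ [] ∧ '/' ∉ repo then
      some (String.ofList owner, String.ofList repo)
    else none

lemma pv_core (l : List Char) (hne : l ≠ [])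
    (h1 : ∀ c, l.head? = some c → c ≠ '/') (h2 : ∀ c, l.getLast? = some c → c ≠ '/') :
    pvA l = pvB l := by
  obtain ⟨c0, l0, rfl⟩ := List.exists_cons_of_ne_nil hne
  have hc0 : c0 ≠ '/' := h1 c0 rfl
  have howner : (c0 :: l0).takeWhile (· ≠ '/') ≠ [] := by
    rw [List.takeWhile_cons_of_pos (by simpa using hc0)]; simp
  have howner_mem : ∀ c ∈ (c0 :: l0).takeWhile (· ≠ '/'), c ≠ '/' := by
    intro c hc; simpa using List.mem_takeWhile_imp hc
  unfold pvA pvB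
  simp only [pv_splitOn_eq]
  cases hd : (c0 :: l0).dropWhile (· ≠ '/') with
  | nil =>
    have hl : (c0 :: l0).takeWhile (· ≠ '/') = c0 :: l0 := by
      conv_rhs => rw [← List.takeWhile_append_dropWhile (p := (· ≠ '/')) (l := c0 :: l0)]
      rw [hd, List.append_nil]
    have hall : ∀ c ∈ c0 :: l0, c ≠ '/' := by
      intro c hc; exact howner_mem c (by rwa [hl])
    rw [pv_noslash _ [] hall]
    simp
  | cons d rest =>
    have hdd : d = '/' := by
      have := pv_head_dropWhile (p := (· ≠ '/')) (l := c0 :: l0) (a := d) (by rw [hd]; rfl)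
      simpa using this
    subst hdd
    have hdecomp : (c0 :: l0).takeWhile (· ≠ '/') ++ '/' :: rest = c0 :: l0 := by
      conv_lhs => rw [← hd]
      exact List.takeWhile_append_dropWhile
    have hlast : ∀ c, ('/' :: rest).getLast? = some c → c ≠ '/' := by
      intro c hc; apply h2
      rw [← hdecomp, List.getLast?_append_of_ne_nil _ (by simp)]; exact hc
    have hrest_ne : rest ≠ [] := by
      rintro rfl; exact hlast '/' rfl rfl
    have hlast_rest : ∀ c, rest.getLast? = some c → c ≠ '/' := by
      intro c hc; apply hlast
      rw [show ('/' :: rest) = ['/'] ++ rest from rfl, List.getLast?_append_of_ne_nil _ hrest_ne]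
      exact hc
    have hslashes : ∀ c ∈ rest.takeWhile (· == '/'), c = '/' := by
      intro c hc; simpa using List.mem_takeWhile_imp hc
    have hrdecomp : rest.takeWhile (· == '/') ++ rest.dropWhile (· == '/') = rest :=
      List.takeWhile_append_dropWhile
    obtain ⟨x, hx⟩ : ∃ x, rest.getLast? = some x := by
      cases hx : rest.getLast? with
      | none => exact absurd (List.getLast?_eq_none_iff.mp hx) hrest_ne
      | some y => exact ⟨y, rfl⟩
    have hxne : x ≠ '/' := hlast_rest x hx
    have hrepo_ne : rest.dropWhile (· == '/') ≠ [] := by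
      intro hr
      have htw : rest.takeWhile (· == '/') = rest := by
        have h' := hrdecomp; rw [hr, List.append_nil] at h'; exact h'
      have hxmem : x ∈ rest := List.mem_of_getLast? hx
      rw [← htw] at hxmem
      exact hxne (hslashes x hxmem)
    have hlast_repo : ∀ c, (rest.dropWhile (· == '/')).getLast? = some c → c ≠ '/' := by
      intro c hc; apply hlast_rest
      rw [← hrdecomp, List.getLast?_append_of_ne_nil _ hrepo_ne]; exact hc
    have hhead_repo : ∀ c, (rest.dropWhile (· == '/')).head? = some c → c ≠ '/' := by
      intro c hc; simpa using pv_head_dropWhile (p := (· == '/')) hc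
    have hsegs : (pvSplitChar (c0 :: l0) []).filter (fun part => part ≠ []) =
        (c0 :: l0).takeWhile (· ≠ '/') ::
          (pvSplitChar (rest.dropWhile (· == '/')) []).filter (fun part => part ≠ []) := by
      conv_lhs => rw [← hdecomp]
      rw [pv_append _ _ [] howner_mem]
      simp only [pvSplitChar, reduceIte, List.append_nil, List.reverse_reverse]
      rw [List.filter_cons_of_pos (by simpa using howner)]
      congr 1
      conv_lhs => rw [← hrdecomp]
      rw [pv_slashes _ _ hslashes]
    rw [hsegs]
    by_cases hmem : '/' ∈ rest.dropWhile (· == '/')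
    · have ho2 : ∀ c ∈ (rest.dropWhile (· == '/')).takeWhile (· ≠ '/'), c ≠ '/' := by
        intro c hc; simpa using List.mem_takeWhile_imp hc
      cases hf2 : (rest.dropWhile (· == '/')).dropWhile (· ≠ '/') with
      | nil =>
        exfalso
        have htw : (rest.dropWhile (· == '/')).takeWhile (· ≠ '/') = rest.dropWhile (· == '/') := by
          conv_rhs => rw [← List.takeWhile_append_dropWhile (p := (· ≠ '/')) (l := rest.dropWhile (· == '/'))]
          rw [hf2, List.append_nil]
        rw [← htw] at hmem
        exact ho2 '/' hmem rfl
      | cons e r2 =>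
        have he : e = '/' := by
          have := pv_head_dropWhile (p := (· ≠ '/')) (l := rest.dropWhile (· == '/')) (a := e)
            (by rw [hf2]; rfl)
          simpa using this
        subst he
        have hrdec2 : (rest.dropWhile (· == '/')).takeWhile (· ≠ '/') ++ '/' :: r2 =
            rest.dropWhile (· == '/') := by
          conv_lhs => rw [← hf2]
          exact List.takeWhile_append_dropWhile
        have hr2_ne : r2 ≠ [] := by
          rintro rfl
          exact hlast_repo '/' (by rw [← hrdec2, List.getLast?_append_of_ne_nil _ (by simp)]; rfl) rfl
        have hlast_r2 : ∀ c, r2.getLast? = some c → c ≠ '/' := by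
          intro c hc; apply hlast_repo
          rw [← hrdec2, List.getLast?_append_of_ne_nil _ (by simp),
              show ('/' :: r2) = ['/'] ++ r2 from rfl, List.getLast?_append_of_ne_nil _ hr2_ne]
          exact hc
        have ho2_ne : (rest.dropWhile (· == '/')).takeWhile (· ≠ '/') ≠ [] := by
          obtain ⟨y, r', hyr⟩ := List.exists_cons_of_ne_nil hrepo_ne
          have hy : y ≠ '/' := hhead_repo y (by rw [hyr]; rfl)
          rw [hyr, List.takeWhile_cons_of_pos (by simpa using hy)]; simp
        have hsegs2 : (pvSplitChar (rest.dropWhile (· == '/')) []).filter (fun part => part ≠ []) =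
            (rest.dropWhile (· == '/')).takeWhile (· ≠ '/') ::
              (pvSplitChar r2 []).filter (fun part => part ≠ []) := by
          conv_lhs => rw [← hrdec2]
          rw [pv_append _ _ [] ho2]
          simp only [pvSplitChar, reduceIte, List.append_nil, List.reverse_reverse]
          rw [List.filter_cons_of_pos (by simpa using ho2_ne)]
        have hr2segs : (pvSplitChar r2 []).filter (fun part => part ≠ []) ≠ [] := by
          intro hnil
          obtain ⟨hall, -⟩ := pv_segs_nil r2 [] hnil
          obtain ⟨y, hy⟩ : ∃ y, r2.getLast? = some y := by
            cases hy : r2.getLast? with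
            | none => exact absurd (List.getLast?_eq_none_iff.mp hy) hr2_ne
            | some y => exact ⟨y, rfl⟩
          exact hlast_r2 y hy (hall y (List.mem_of_getLast? hy))
        rw [hsegs2, if_pos (by
          simp only [List.length_cons]
          have := List.length_pos_iff.mpr hr2segs
          omega)]
        simp [hmem]
    · have hall : ∀ c ∈ rest.dropWhile (· == '/'), c ≠ '/' := by
        intro c hc hceq; exact hmem (hceq ▸ hc)
      rw [pv_noslash _ [] hall]
      simp only [List.reverse_nil, List.nil_append]
      rw [List.filter_cons_of_pos (by simpa using hrepo_ne)]
      simp [List.getD, hrepo_ne, hmem, hc0]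

theorem parse_owner_repo_spec : Claim_equal_parse_owner_repo := by
  intro value _
  show parse_owner_repo value = parse_owner_repo_alt value
  have hA : parse_owner_repo value =
      (if PySem.Str.stripChars (PySem.Str.strip value) "/" = "" then none
       else pvA (PySem.Str.stripChars (PySem.Str.strip value) "/").toList) := rfl
  have hB : parse_owner_repo_alt value =
      pvB (PySem.Str.stripChars (PySem.Str.strip value) "/").toList := by
    cases hd : (PySem.Str.stripChars (PySem.Str.strip value) "/").toList.dropWhile (· ≠ '/') with
    | nil => simp only [parse_owner_repo_alt, pvB, hd]
    | cons d r => simp only [parse_owner_repo_alt, pvB, hd]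
  rw [hA, hB]
  set t := PySem.Str.stripChars (PySem.Str.strip value) "/" with ht
  have htl : t.toList = PySem.Chars.stripChars (PySem.Str.strip value).toList ['/'] := by
    rw [ht]; simp [PySem.Str.toList_stripChars]
  by_cases he : t = ""
  · rw [if_pos he, he]; rfl
  · rw [if_neg he]
    have hnil : t.toList ≠ [] := by
      simpa [String.toList_eq_nil_iff] using he
    apply pv_core _ hnil
    · intro c hc
      exact pv_strip_head (PySem.Str.strip value).toList (by rw [← htl]; exact hc)
    · intro c hc
      exact pv_strip_last (PySem.Str.strip value).toList (by rw [← htl]; exact hc)
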